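-- pv_equiv track=rewrite | github.com/Akshat4112/Disease-and-Gene-Entity-Recognition | code/evaluationnew.py | createwordsequencesdisease
-- ===== SOURCE A (Python) =====
-- def createwordsequencesdisease(y):
--
--     currentword = None
--     dropi = False
--     wordslist = []
--     FP = 0
--
--     for i in range(len(y)):
--         if dropi:  # in case we encounter a beginning i first state
--             if y[i] == "|I-DISEASE\n":
--                 continue
--             elif y[i] == "|O\n":
--                 dropi = False
--             elif y[i] == "|B-DISEASE\n":
--                 currentword = [i]
--                 dropi = False
--
--         elif not currentword:  # not currently word, second state
--             if y[i] == "|O\n":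
--                 continue
--             elif y[i] == "|B-DISEASE\n":
--                 currentword = [i]
--             elif y[i] == "|I-DISEASE\n":
--                 dropi = True
--                 FP += 1
--
--         else:  # yes we are processing a current word, third state
--             if y[i] == "|O\n":
--                 wordslist.append(tuple(currentword))  # store partial result
--                 currentword = (
--                     None  # we are done with the current word so we set it back to none
--                 )
--             elif y[i] == "|B-DISEASE\n":
--                 wordslist.append(tuple(currentword))  # store partial result
--                 currentword = [
--                     i
--                 ]  # & we stay in state because we are seeing another word
--             else:  # if i is i-disease label
--                 currentword.append(
--                     i
--                 )  # we store in the tuple of the current word as many i as we encounter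
--
--     return wordslist, FP
-- ===== SOURCE B (Python) =====
-- O = "|O\n"
-- B = "|B-DISEASE\n"
-- I = "|I-DISEASE\n"
--
-- def createwordsequencesdisease(y):
--     # Cursor/while-loop over maximal runs instead of a boolean state machine.
--     # A word is recorded only when it is closed by an |O or |B label (a word
--     # still open at the end of the list is not recorded, as in the original).
--     n = len(y)
--     words = []
--     FP = 0
--     i = 0
--     while i < n:
--         lab = y[i]
--         if lab == B:
--             word = [i]
--             i += 1
--             while i < n and y[i] != O and y[i] != B:
--                 word.append(i)
--                 i += 1
--             if i < n:
--                 words.append(tuple(word))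
--         elif lab == I:
--             FP += 1
--             i += 1
--             while i < n and y[i] != O and y[i] != B:
--                 i += 1
--         else:
--             i += 1
--     return words, FP
-- ===== Notes on version B (the rewrite author's own statement) =====
-- stated objective: alternative
-- what changed: Replaces A's per-index boolean state machine (dropi/currentword flags) by a cursor while-loop that consumes maximal non-O/non-B runs after each |B-DISEASE (recording the run) or out-of-word |I-DISEASE (counting one FP).
import Mathlib
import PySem

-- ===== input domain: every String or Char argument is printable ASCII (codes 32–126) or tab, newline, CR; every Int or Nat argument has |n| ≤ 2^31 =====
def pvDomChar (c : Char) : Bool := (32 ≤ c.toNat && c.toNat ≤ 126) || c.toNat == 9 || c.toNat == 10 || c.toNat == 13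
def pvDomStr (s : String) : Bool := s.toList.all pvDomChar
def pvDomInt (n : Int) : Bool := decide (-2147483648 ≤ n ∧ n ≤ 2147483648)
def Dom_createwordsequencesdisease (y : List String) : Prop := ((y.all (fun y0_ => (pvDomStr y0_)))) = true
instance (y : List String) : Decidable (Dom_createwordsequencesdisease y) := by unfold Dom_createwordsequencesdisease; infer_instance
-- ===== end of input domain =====

-- B replaces A's boolean state machine by a cursor loop over maximal label runs; return values agree on all inputs (alternative decomposition, same cost).

def pvLabO : String := "|O\n"
def pvLabB : String := "|B-DISEASE\n"
def pvLabI : String := "|I-DISEASE\n"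

-- ===== PORT A =====
-- state: (currentword, dropi, wordslist, FP), one step of A's for-loop body
def pvStepA (y : List String) (st : Option (List Int) × Bool × List (List Int) × Int) (i : Nat) :
    Option (List Int) × Bool × List (List Int) × Int :=
  let lab := y.getD i ""
  match st with
  | (cw, dropi, W, F) =>
    if dropi then
      if lab = pvLabI then (cw, dropi, W, F)
      else if lab = pvLabO then (cw, false, W, F)
      else if lab = pvLabB then (some [(i : Int)], false, W, F)
      else (cw, dropi, W, F)
    else
      match cw with
      | none =>
        if lab = pvLabO then (none, false, W, F)
        else if lab = pvLabB then (some [(i : Int)], false, W, F)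
        else if lab = pvLabI then (none, true, W, F + 1)
        else (none, false, W, F)
      | some w =>
        if lab = pvLabO then (none, false, W ++ [w], F)
        else if lab = pvLabB then (some [(i : Int)], false, W ++ [w], F)
        else (some (w ++ [(i : Int)]), false, W, F)

def createwordsequencesdisease (y : List String) : List (List Int) × Int :=
  let st := (List.range y.length).foldl (pvStepA y) (none, false, [], 0)
  (st.2.2.1, st.2.2.2)

-- ===== PORT B =====
-- Python B's inner while after a |B-DISEASE: collect indices until |O or |B (or end); returns (collected indices, stop position)
def pvConsume (y : List String) (i : Nat) : List Int × Nat :=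
  if h : i < y.length then
    let lab := y.getD i ""
    if lab = pvLabO ∨ lab = pvLabB then ([], i)
    else
      let r := pvConsume y (i + 1)
      ((i : Int) :: r.1, r.2)
  else ([], i)
termination_by y.length - i

-- Python B's inner while after an out-of-word |I-DISEASE: skip to the next |O or |B (or end)
def pvSkip (y : List String) (i : Nat) : Nat :=
  if h : i < y.length then
    let lab := y.getD i ""
    if lab = pvLabO ∨ lab = pvLabB then i
    else pvSkip y (i + 1)
  else i
termination_by y.length - i

theorem pvConsume_ge (y : List String) (i : Nat) : i ≤ (pvConsume y i).2 := by
  rw [pvConsume]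
  split
  · simp only
    split
    · simp
    · have := pvConsume_ge y (i + 1)
      simp only
      omega
  · simp
termination_by y.length - i

theorem pvSkip_ge (y : List String) (i : Nat) : i ≤ pvSkip y i := by
  rw [pvSkip]
  split
  · simp only
    split
    · simp
    · have := pvSkip_ge y (i + 1)
      omega
  · simp
termination_by y.length - i

def pvAltLoop (y : List String) (i : Nat) (W : List (List Int)) (F : Int) : List (List Int) × Int :=
  if h : i < y.length then
    let lab := y.getD i ""
    if lab = pvLabB then
      let r := pvConsume y (i + 1)
      pvAltLoop y r.2 (if r.2 < y.length then W ++ [(i : Int) :: r.1] else W) F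
    else if lab = pvLabI then
      pvAltLoop y (pvSkip y (i + 1)) W (F + 1)
    else pvAltLoop y (i + 1) W F
  else (W, F)
termination_by y.length - i
decreasing_by
  · have := pvConsume_ge y (i + 1); omega
  · have := pvSkip_ge y (i + 1); omega
  · omega

def createwordsequencesdisease_alt (y : List String) : List (List Int) × Int :=
  pvAltLoop y 0 [] 0

-- ===== PRECONDITION & SPEC =====
def Spec_createwordsequencesdisease (y : List String) (out : List (List Int) × Int) : Prop := out = createwordsequencesdisease_alt y
instance (y : List String) (out : List (List Int) × Int) : Decidable (Spec_createwordsequencesdisease y out) := by unfold Spec_createwordsequencesdisease; infer_instance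

-- ===== CLAIM (what is proved, stated in full; the proofs are below) =====
def Claim_equal_createwordsequencesdisease : Prop := ∀ (y : List String), Dom_createwordsequencesdisease y → Spec_createwordsequencesdisease y (createwordsequencesdisease y)

-- ===== LEMMAS AND PROOFS =====
def pvRes (st : Option (List Int) × Bool × List (List Int) × Int) : List (List Int) × Int :=
  (st.2.2.1, st.2.2.2)

def pvAfold (y : List String) (i : Nat) (st : Option (List Int) × Bool × List (List Int) × Int) :
    Option (List Int) × Bool × List (List Int) × Int :=
  (List.range' i (y.length - i)).foldl (pvStepA y) st

theorem pvAfold_step (y : List String) (i : Nat) (st : Option (List Int) × Bool × List (List Int) × Int)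
    (hi : i < y.length) : pvAfold y i st = pvAfold y (i + 1) (pvStepA y st i) := by
  unfold pvAfold
  have h : y.length - i = (y.length - (i + 1)) + 1 := by omega
  rw [h, List.range'_succ, List.foldl_cons]

theorem pvAfold_stop (y : List String) (i : Nat) (st : Option (List Int) × Bool × List (List Int) × Int)
    (hi : ¬ i < y.length) : pvAfold y i st = st := by
  unfold pvAfold
  have h : y.length - i = 0 := by omega
  rw [h]
  simp

theorem pvMain (y : List String) : ∀ k i, y.length - i ≤ k →
    (∀ W F, pvRes (pvAfold y i (none, false, W, F)) = pvAltLoop y i W F) ∧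
    (∀ W F, pvRes (pvAfold y i (none, true, W, F)) = pvAltLoop y (pvSkip y i) W F) ∧
    (∀ w W F, pvRes (pvAfold y i (some w, false, W, F)) =
      pvAltLoop y (pvConsume y i).2
        (if (pvConsume y i).2 < y.length then W ++ [w ++ (pvConsume y i).1] else W) F) := by
  intro k
  induction k with
  | zero =>
    intro i hk
    have hi : ¬ i < y.length := by omega
    refine ⟨?_, ?_, ?_⟩
    · intro W F
      rw [pvAfold_stop y i _ hi, pvAltLoop]
      simp [hi, pvRes]
    · intro W F
      rw [pvAfold_stop y i _ hi, pvSkip]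
      simp only [hi, dite_false]
      rw [pvAltLoop]
      simp [hi, pvRes]
    · intro w W F
      rw [pvAfold_stop y i _ hi, pvConsume]
      simp only [hi, dite_false]
      rw [pvAltLoop]
      simp [hi, pvRes]
  | succ k ih =>
    intro i hk
    by_cases hi : i < y.length
    case neg => exact ih i (by omega)
    case pos =>
      obtain ⟨C1, C2, C3⟩ := ih (i + 1) (by omega)
      have hOB : ¬ pvLabO = pvLabB := by decide
      have hOI : ¬ pvLabO = pvLabI := by decide
      have hBO : ¬ pvLabB = pvLabO := by decide
      have hBI : ¬ pvLabB = pvLabI := by decide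
      have hIO : ¬ pvLabI = pvLabO := by decide
      have hIB : ¬ pvLabI = pvLabB := by decide
      by_cases hO : y[i]'hi = pvLabO
      · refine ⟨?_, ?_, ?_⟩
        · intro W F
          rw [pvAfold_step y i _ hi, pvAltLoop]
          simp [pvStepA, hO, hOB, hOI, hi]
          exact C1 W F
        · intro W F
          rw [pvSkip]
          rw [pvAfold_step y i _ hi]
          simp [pvStepA, hO, hOB, hOI, hi]
          rw [pvAltLoop]
          simp [hO, hOB, hOI, hi]
          exact C1 W F
        · intro w W F
          rw [pvConsume]
          rw [pvAfold_step y i _ hi]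
          simp [pvStepA, hO, hOB, hi]
          rw [pvAltLoop]
          simp [hO, hOB, hOI, hi]
          exact C1 (W ++ [w]) F
      · by_cases hB : y[i]'hi = pvLabB
        · refine ⟨?_, ?_, ?_⟩
          · intro W F
            rw [pvAfold_step y i _ hi, pvAltLoop]
            simp [pvStepA, hB, hBO, hi]
            have := C3 [(i : Int)] W F
            simpa using this
          · intro W F
            rw [pvSkip]
            rw [pvAfold_step y i _ hi]
            simp [pvStepA, hB, hBO, hBI, hi]
            rw [pvAltLoop]
            simp [hB, hi]
            have := C3 [(i : Int)] W F
            simpa using this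
          · intro w W F
            rw [pvConsume]
            rw [pvAfold_step y i _ hi]
            simp [pvStepA, hB, hBO, hi]
            rw [pvAltLoop]
            simp [hB, hi]
            have := C3 [(i : Int)] (W ++ [w]) F
            rw [this]
            congr 1
            split <;> simp
        · by_cases hI : y[i]'hi = pvLabI
          · refine ⟨?_, ?_, ?_⟩
            · intro W F
              rw [pvAfold_step y i _ hi, pvAltLoop]
              simp [pvStepA, hI, hIO, hIB, hi]
              exact C2 W (F + 1)
            · intro W F
              rw [pvSkip]
              rw [pvAfold_step y i _ hi]
              simp [pvStepA, hI, hIO, hIB, hi]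
              exact C2 W F
            · intro w W F
              rw [pvConsume]
              rw [pvAfold_step y i _ hi]
              simp [pvStepA, hI, hIO, hIB, hi]
              have := C3 (w ++ [(i : Int)]) W F
              rw [this]
              congr 1
              split <;> simp
          · refine ⟨?_, ?_, ?_⟩
            · intro W F
              rw [pvAfold_step y i _ hi, pvAltLoop]
              simp [pvStepA, hO, hB, hI, hi]
              exact C1 W F
            · intro W F
              rw [pvSkip]
              rw [pvAfold_step y i _ hi]
              simp [pvStepA, hO, hB, hI, hi]
              exact C2 W F
            · intro w W F
              rw [pvConsume]
              rw [pvAfold_step y i _ hi]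
              simp [pvStepA, hO, hB, hi]
              have := C3 (w ++ [(i : Int)]) W F
              rw [this]
              congr 1
              split <;> simp

-- ===== VERDICT (by name: the statement is the Claim_ definition above) =====
theorem createwordsequencesdisease_spec : Claim_equal_createwordsequencesdisease := by
  intro y _hdom
  unfold Spec_createwordsequencesdisease createwordsequencesdisease createwordsequencesdisease_alt
  have h := (pvMain y y.length 0 (by omega)).1 [] 0
  unfold pvRes pvAfold at h
  simpa [List.range_eq_range'] using h
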